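-- pv_equiv track=rewrite | github.com/Frostedpilot/Postman_VRP | VRP_HC_best_case.py | revert
-- ===== SOURCE A (Python) =====
-- def revert(route):
--     res = []
--     cur = 0
--     for i in range(1, len(route)):
--         if route[i] == 0:
--             res.append(route[cur:i])
--             cur = i
--     res.append(route[cur:])
--     return res
-- ===== SOURCE B (Python) =====
-- def revert(route):
--     if not route:
--         return [[]]
--     res = [[route[0]]]
--     for x in route[1:]:
--         if x == 0:
--             res.append([x])
--         else:
--             res[-1].append(x)
--     return res
-- ===== Notes on version B (the rewrite author's own statement) =====
-- stated objective: alternative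
-- what changed: B abandons index arithmetic and slicing entirely: it groups the elements themselves in one element-wise pass, seeding the result with a singleton group holding the first element and, for each later element, either opening a new group at a zero or appending the element to the last group, where A computes slice boundaries with a cursor over indices.
import Mathlib
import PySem

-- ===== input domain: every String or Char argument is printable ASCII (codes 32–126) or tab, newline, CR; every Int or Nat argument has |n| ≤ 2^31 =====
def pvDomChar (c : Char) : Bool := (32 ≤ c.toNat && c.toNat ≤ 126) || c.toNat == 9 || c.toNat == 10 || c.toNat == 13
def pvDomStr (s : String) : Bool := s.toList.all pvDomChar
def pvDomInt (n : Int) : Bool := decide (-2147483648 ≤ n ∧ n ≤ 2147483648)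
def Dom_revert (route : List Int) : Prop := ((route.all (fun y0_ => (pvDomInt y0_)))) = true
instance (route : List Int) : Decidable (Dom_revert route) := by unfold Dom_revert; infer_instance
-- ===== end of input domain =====

-- B groups elements directly (new group at each zero, else append to the last group) instead of A's index/slice accumulation; alternative decomposition, same cost.

-- ===== PORT A =====
-- single fold over range(1, len), accumulating slices and the cursor inline
def revert (route : List Int) : List (List Int) :=
  let st := (PySem.List.pyRange 1 (route.length : Int) 1).foldl
    (fun (s : List (List Int) × Int) i =>
      if PySem.List.pyGetD route i 0 == 0 then
        (s.1 ++ [PySem.List.slice route (some s.2) (some i)], i)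
      else s)
    ([], 0)
  st.1 ++ [PySem.List.slice route (some st.2) none]

-- ===== PORT B =====
-- res[-1].append(x): append x to the last group
def pvAppendLast : List (List Int) → Int → List (List Int)
  | [], _ => []
  | [g], x => [g ++ [x]]
  | g :: gs, x => g :: pvAppendLast gs x

-- element-wise grouping: seed with [route[0]], then each x opens a group (x == 0) or joins the last
def revert_alt (route : List Int) : List (List Int) :=
  match route with
  | [] => [[]]
  | h :: t =>
    t.foldl (fun res x => if x == 0 then res ++ [[x]] else pvAppendLast res x) [[h]]

-- ===== PRECONDITION & SPEC =====
def Spec_revert (route : List Int) (out : List (List Int)) : Prop := out = revert_alt route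
instance (route : List Int) (out : List (List Int)) : Decidable (Spec_revert route out) := by unfold Spec_revert; infer_instance

-- ===== CLAIM (what is proved, stated in full; the proofs are below) =====
def Claim_equal_revert : Prop := ∀ (route : List Int), Dom_revert route → Spec_revert route (revert route)

-- ===== LEMMAS AND PROOFS =====

-- A-shaped segment list determined by the cursor and the list of zero positions (open final slice)
def segsA (route : List Int) (cur : Int) : List Int → List (List Int)
  | [] => [PySem.List.slice route (some cur) none]
  | i :: t => PySem.List.slice route (some cur) (some i) :: segsA route i t

-- reference recursion both ports are reduced to: group the tail, a zero opens a new group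
def groupTail : List Int → List Int → List (List Int)
  | cur, [] => [cur]
  | cur, x :: t => if x = 0 then cur :: groupTail [x] t else groupTail (cur ++ [x]) t

-- ---- A-side: the fold equals segsA over the filtered zero positions ----
theorem foldA_eq_foldB_filter (route : List Int) (L : List Int) (s : List (List Int) × Int) :
    L.foldl (fun (s : List (List Int) × Int) i =>
        if PySem.List.pyGetD route i 0 == 0 then
          (s.1 ++ [PySem.List.slice route (some s.2) (some i)], i)
        else s) s
    = (L.filter (fun i => PySem.List.pyGetD route i 0 == 0)).foldl
        (fun (s : List (List Int) × Int) i =>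
          (s.1 ++ [PySem.List.slice route (some s.2) (some i)], i)) s := by
  induction L generalizing s with
  | nil => rfl
  | cons z t ih =>
    simp only [List.foldl_cons, List.filter_cons]
    by_cases h : (PySem.List.pyGetD route z 0 == 0) = true
    · rw [if_pos h, if_pos h, List.foldl_cons]; exact ih _
    · rw [if_neg h, if_neg h]; exact ih _

theorem foldB_segsA (route : List Int) (zs : List Int) (res : List (List Int)) (cur : Int) :
    (zs.foldl (fun (s : List (List Int) × Int) i =>
        (s.1 ++ [PySem.List.slice route (some s.2) (some i)], i)) (res, cur)).1
      ++ [PySem.List.slice route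
            (some (zs.foldl (fun (s : List (List Int) × Int) i =>
              (s.1 ++ [PySem.List.slice route (some s.2) (some i)], i)) (res, cur)).2) none]
    = res ++ segsA route cur zs := by
  induction zs generalizing res cur with
  | nil => simp [segsA]
  | cons z t ih => simp [List.foldl, segsA, ih]

-- ---- groupTail facts ----
theorem groupTail_no_zero (t : List Int) : ∀ cur, (∀ x ∈ t, x ≠ 0) →
    groupTail cur t = [cur ++ t] := by
  induction t with
  | nil => intro cur _; simp [groupTail]
  | cons x t ih =>
    intro cur h
    have hx : x ≠ 0 := h x (by simp)
    simp only [groupTail, if_neg hx]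
    rw [ih (cur ++ [x]) (fun y hy => h y (by simp [hy]))]
    simp

theorem groupTail_split (u : List Int) : ∀ cur (v : List Int), (∀ x ∈ u, x ≠ 0) →
    groupTail cur (u ++ 0 :: v) = (cur ++ u) :: groupTail [0] v := by
  induction u with
  | nil => intro cur v _; simp [groupTail]
  | cons x u ih =>
    intro cur v h
    have hx : x ≠ 0 := h x (by simp)
    simp only [List.cons_append, groupTail, if_neg hx]
    rw [ih (cur ++ [x]) v (fun y hy => h y (by simp [hy]))]
    simp

-- ---- the crux: segsA over the exact zero-position list equals groupTail ----
theorem crux (route : List Int) : ∀ (zs : List Int) (c : ℕ) (hc : c < route.length),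
    (∀ i ∈ zs, (c : Int) < i ∧ i < (route.length : Int)) →
    List.Pairwise (· < ·) zs →
    (∀ (j : ℕ) (hj : j < route.length), c < j → (route[j] = 0 ↔ (j : Int) ∈ zs)) →
    segsA route (c : Int) zs = groupTail [route[c]] (route.drop (c + 1)) := by
  intro zs
  induction zs with
  | nil =>
    intro c hc _ _ hm
    have hnz : ∀ x ∈ route.drop (c + 1), x ≠ 0 := by
      intro x hx
      obtain ⟨k, hk, hke⟩ := List.mem_iff_getElem.mp hx
      have hk' : c + 1 + k < route.length := by
        have := hk; simp [List.length_drop] at this; omega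
      rw [List.getElem_drop] at hke
      intro h0
      have := (hm (c + 1 + k) hk' (by omega)).mp (by rw [hke]; exact h0)
      simp at this
    rw [groupTail_no_zero _ _ hnz]
    have : [route[c]] ++ route.drop (c + 1) = route.drop c := by
      rw [List.drop_eq_getElem_cons hc]; simp
    rw [this]
    simp [segsA, PySem.List.slice_from_natCast]
  | cons i t ih =>
    intro c hc hb hp hm
    obtain ⟨hci, hilen⟩ := hb i (by simp)
    set ni := i.toNat with hni
    have hieq : i = (ni : Int) := by omega
    have hcni : c < ni := by omega
    have hnilen : ni < route.length := by omega
    have hzero : route[ni] = 0 := by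
      exact (hm ni hnilen hcni).mpr (by rw [← hieq]; simp)
    -- decompose route.drop (c+1) = mid ++ 0 :: route.drop (ni+1)
    have hdecomp : route.drop (c + 1)
        = (route.drop (c + 1)).take (ni - (c + 1)) ++ 0 :: route.drop (ni + 1) := by
      conv_lhs => rw [← List.take_append_drop (ni - (c + 1)) (route.drop (c + 1))]
      rw [List.drop_drop]
      have : c + 1 + (ni - (c + 1)) = ni := by omega
      rw [this, List.drop_eq_getElem_cons hnilen, hzero]
    have hmidnz : ∀ x ∈ (route.drop (c + 1)).take (ni - (c + 1)), x ≠ 0 := by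
      intro x hx
      obtain ⟨k, hk, hke⟩ := List.mem_iff_getElem.mp hx
      have hkb : k < ni - (c + 1) := by
        have := hk; simp [List.length_take, List.length_drop] at this; omega
      have hk' : c + 1 + k < route.length := by omega
      rw [List.getElem_take, List.getElem_drop] at hke
      intro h0
      have hjz := (hm (c + 1 + k) hk' (by omega)).mp (by rw [hke]; exact h0)
      rcases List.mem_cons.mp hjz with h | h
      · omega
      · have := List.rel_of_pairwise_cons hp h
        omega
    -- IH hypotheses for t at cursor ni
    have hbt : ∀ j ∈ t, (ni : Int) < j ∧ j < (route.length : Int) := by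
      intro j hj
      exact ⟨by rw [← hieq]; exact List.rel_of_pairwise_cons hp hj, (hb j (by simp [hj])).2⟩
    have hmt : ∀ (j : ℕ) (hj : j < route.length), ni < j → (route[j] = 0 ↔ (j : Int) ∈ t) := by
      intro j hj hnij
      constructor
      · intro h0
        have := (hm j hj (by omega)).mp h0
        rcases List.mem_cons.mp this with h | h
        · exfalso; omega
        · exact h
      · intro hjt
        exact (hm j hj (by omega)).mpr (by simp [hjt])
    have hrec := ih ni hnilen hbt (List.Pairwise.of_cons hp) hmt
    -- assemble
    simp only [segsA]
    rw [hdecomp, groupTail_split _ _ _ hmidnz, hieq]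
    congr 1
    · -- slice route c ni = [route[c]] ++ mid
      rw [PySem.List.slice_natCast]
      rw [List.drop_eq_getElem_cons hc]
      have : ni - c = (ni - (c + 1)) + 1 := by omega
      rw [this, List.take_succ_cons]
      simp
    · rw [hrec, hzero]

-- ---- B-side: the fold equals groupTail ----
theorem appendLast_append (res : List (List Int)) (g : List Int) (x : Int) :
    pvAppendLast (res ++ [g]) x = res ++ [g ++ [x]] := by
  induction res with
  | nil => rfl
  | cons r rs ih =>
    cases rs with
    | nil => simp [pvAppendLast]
    | cons a b => simpa [pvAppendLast] using ih

theorem foldB_groupTail (t : List Int) : ∀ (res : List (List Int)) (cur : List Int),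
    t.foldl (fun res x => if x == 0 then res ++ [[x]] else pvAppendLast res x) (res ++ [cur])
    = res ++ groupTail cur t := by
  induction t with
  | nil => intro res cur; simp [groupTail]
  | cons x t ih =>
    intro res cur
    by_cases hx : x = 0
    · subst hx
      simp only [List.foldl_cons, groupTail, beq_self_eq_true, if_true]
      rw [ih (res ++ [cur]) [0]]
      simp
    · simp only [List.foldl_cons, groupTail, if_neg hx,
        if_neg (by simpa using hx : ¬ ((x == 0) = true))]
      rw [appendLast_append, ih]

-- ===== VERDICT (by name: the statement is the Claim_ definition above) =====
theorem revert_spec : Claim_equal_revert := by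
  intro route _
  unfold Spec_revert
  cases route with
  | nil => decide
  | cons h t =>
    -- A side reduced to segsA over the zero positions
    show revert (h :: t) = revert_alt (h :: t)
    unfold revert
    rw [foldA_eq_foldB_filter, foldB_segsA, List.nil_append]
    -- B side reduced to groupTail
    have hB : revert_alt (h :: t) = groupTail [h] t := by
      unfold revert_alt
      simpa using foldB_groupTail t [] [h]
    rw [hB]
    have hc : 0 < (h :: t).length := by simp
    have := crux (h :: t)
      ((PySem.List.pyRange 1 ((h :: t).length : Int) 1).filter
        (fun i => PySem.List.pyGetD (h :: t) i 0 == 0)) 0 hc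
      ?hb ?hp ?hm
    · simpa using this
    case hb =>
      intro i hi
      have := List.mem_filter.mp hi
      have := PySem.List.mem_pyRange_one.mp this.1
      constructor <;> omega
    case hp =>
      exact List.Pairwise.sublist List.filter_sublist (PySem.List.pairwise_lt_pyRange_one _ _)
    case hm =>
      intro j hj hjpos
      rw [List.mem_filter, PySem.List.mem_pyRange_one]
      have hget : PySem.List.pyGetD (h :: t) (j : Int) 0 = (h :: t)[j] := by
        simp [PySem.List.pyGetD_natCast, List.getD_eq_getElem?_getD, List.getElem?_eq_getElem hj]
      constructor
      · intro h0
        refine ⟨⟨by omega, by omega⟩, ?_⟩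
        rw [hget, h0]; rfl
      · intro ⟨_, hb⟩
        rw [hget] at hb
        exact beq_iff_eq.mp hb
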